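-- pv_equiv track=rewrite | github.com/ManluYi/NIA | scripts/python/ensure_optimizaiton.py | clean_end
-- ===== SOURCE A (Python) =====
-- def clean_end(lines):
--     """从末尾删除所有命令行（check-sat, get-objectives, exit, set-option ...）及空行"""
--     commands = {'(check-sat)', '(get-objectives)', '(exit)'}
--     # 从后向前遍历，删除行
--     while lines:
--         line = lines[-1].strip()
--         if line == '':
--             lines.pop()
--             continue
--         if line in commands or line.startswith('(set-option :timeout'):
--             lines.pop()
--         else:
--             break
--     # 再删除末尾可能残留的空行
--     while lines and lines[-1].strip() == '':
--         lines.pop()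
--     return lines
-- ===== SOURCE B (Python) =====
-- def clean_end(lines):
--     """从末尾删除所有命令行（check-sat, get-objectives, exit, set-option ...）及空行"""
--     commands = {'(check-sat)', '(get-objectives)', '(exit)'}
--     keep = 0
--     for idx, raw in enumerate(lines):
--         line = raw.strip()
--         if line != '' and line not in commands and not line.startswith('(set-option :timeout'):
--             keep = idx + 1
--     del lines[keep:]
--     return lines
-- ===== Notes on version B (the rewrite author's own statement) =====
-- stated objective: alternative
-- what changed: A pops lines off the end one by one (two backward while-loops); B does one forward scan that records the position after the last non-removable line and truncates the list once with del lines[keep:].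
import Mathlib
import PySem

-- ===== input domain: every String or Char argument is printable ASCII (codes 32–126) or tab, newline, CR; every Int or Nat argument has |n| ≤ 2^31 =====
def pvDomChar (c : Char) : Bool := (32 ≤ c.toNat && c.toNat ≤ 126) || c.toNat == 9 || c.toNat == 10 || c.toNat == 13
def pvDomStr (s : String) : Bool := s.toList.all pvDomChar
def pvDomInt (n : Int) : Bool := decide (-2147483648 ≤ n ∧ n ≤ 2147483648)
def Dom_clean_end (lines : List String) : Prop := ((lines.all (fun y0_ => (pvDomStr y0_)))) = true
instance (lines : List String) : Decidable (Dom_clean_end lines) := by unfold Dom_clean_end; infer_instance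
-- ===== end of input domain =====

-- B removes the trailing command/blank lines by one forward scan (record the position after the
-- last kept line, then truncate once) instead of A's backward popping; return-value equivalence
-- (both Pythons mutate the argument list in place to the same final contents).

-- ===== PORT A =====
-- first while-loop of A: pop the last line while it is blank or a command line
def cleanEndLoop1 (lines : List String) : List String :=
  if h : lines = [] then lines
  else
    let line := PySem.Str.strip (lines.getLast h)
    if line == "" then cleanEndLoop1 lines.dropLast
    else if line == "(check-sat)" || line == "(get-objectives)" || line == "(exit)"
            || PySem.Str.startswith line "(set-option :timeout" then
      cleanEndLoop1 lines.dropLast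
    else lines
termination_by lines.length
decreasing_by
  all_goals
    simp only [List.length_dropLast]
    have := List.length_pos_iff.mpr h
    omega

-- second while-loop of A: pop remaining trailing blank lines
def cleanEndLoop2 (lines : List String) : List String :=
  if h : lines = [] then lines
  else if PySem.Str.strip (lines.getLast h) == "" then cleanEndLoop2 lines.dropLast
  else lines
termination_by lines.length
decreasing_by
  simp only [List.length_dropLast]
  have := List.length_pos_iff.mpr h
  omega

def clean_end (lines : List String) : List String :=
  cleanEndLoop2 (cleanEndLoop1 lines)

-- ===== PORT B =====
def clean_end_alt (lines : List String) : List String :=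
  let keep : Int := (PySem.List.enumerate lines).foldl
    (fun keep p =>
      let line := PySem.Str.strip p.2
      if (line != "")
          && !(line == "(check-sat)" || line == "(get-objectives)" || line == "(exit)")
          && !PySem.Str.startswith line "(set-option :timeout" then p.1 + 1 else keep)
    0
  PySem.List.slice lines none (some keep)    -- del lines[keep:]

-- ===== PRECONDITION & SPEC =====
def Spec_clean_end (lines : List String) (out : List String) : Prop := out = clean_end_alt lines
instance (lines : List String) (out : List String) : Decidable (Spec_clean_end lines out) := by unfold Spec_clean_end; infer_instance

-- ===== CLAIM (what is proved, stated in full; the proofs are below) =====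
def Claim_equal_clean_end : Prop := ∀ (lines : List String), Dom_clean_end lines → Spec_clean_end lines (clean_end lines)

-- ===== LEMMAS AND PROOFS =====

/-- A line is removed by `clean_end`: blank after strip, a known command, or a timeout option. -/
def pvRem (s : String) : Bool :=
  PySem.Str.strip s == "" ||
    (PySem.Str.strip s == "(check-sat)" || PySem.Str.strip s == "(get-objectives)"
      || PySem.Str.strip s == "(exit)"
      || PySem.Str.startswith (PySem.Str.strip s) "(set-option :timeout")

theorem cleanEndLoop1_eq (r : List String) :
    cleanEndLoop1 r.reverse = (r.dropWhile pvRem).reverse := by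
  induction r with
  | nil => simp [cleanEndLoop1]
  | cons x r ih =>
    rw [cleanEndLoop1]
    have hne : (x :: r).reverse ≠ [] := by simp
    have hlast : (x :: r).reverse.getLast hne = x := by
      simp [List.reverse_cons]
    have hdl : (x :: r).reverse.dropLast = r.reverse := by
      simp [List.reverse_cons]
    rw [dif_neg hne, List.dropWhile_cons]
    simp only [hlast, hdl]
    by_cases hb : (PySem.Str.strip x == "") = true
    · have hrem : pvRem x = true := by rw [pvRem, hb, Bool.true_or]
      rw [if_pos hb, ih, hrem, if_pos rfl]
    · rw [if_neg hb]
      by_cases hc : (PySem.Str.strip x == "(check-sat)" || PySem.Str.strip x == "(get-objectives)"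
          || PySem.Str.strip x == "(exit)"
          || PySem.Str.startswith (PySem.Str.strip x) "(set-option :timeout") = true
      · have hrem : pvRem x = true := by rw [pvRem, hc, Bool.or_true]
        rw [if_pos hc, ih, hrem, if_pos rfl]
      · have hrem : pvRem x = false := by
          rw [pvRem, Bool.eq_false_iff] at *
          intro h
          rcases Bool.or_eq_true_iff.mp h with h1 | h2
          · exact hb h1
          · exact hc h2
        rw [if_neg hc, hrem, if_neg (by simp)]

theorem cleanEndLoop2_eq (r : List String) :
    cleanEndLoop2 r.reverse = (r.dropWhile (fun s => PySem.Str.strip s == "")).reverse := by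
  induction r with
  | nil => simp [cleanEndLoop2]
  | cons x r ih =>
    rw [cleanEndLoop2]
    have hne : (x :: r).reverse ≠ [] := by simp
    have hlast : (x :: r).reverse.getLast hne = x := by
      simp [List.reverse_cons]
    have hdl : (x :: r).reverse.dropLast = r.reverse := by
      simp [List.reverse_cons]
    rw [dif_neg hne, List.dropWhile_cons]
    simp only [hlast, hdl]
    by_cases hb : (PySem.Str.strip x == "") = true
    · rw [if_pos hb, ih, if_pos hb]
    · rw [if_neg hb, if_neg hb]

theorem dropWhile_dropWhile {α : Type} (p q : α → Bool) (h : ∀ x, q x = true → p x = true)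
    (l : List α) : (l.dropWhile p).dropWhile q = l.dropWhile p := by
  induction l with
  | nil => simp
  | cons x l ih =>
    by_cases hp : p x = true
    · rw [List.dropWhile_cons, if_pos hp, ih]
    · have hq : q x = false := by
        cases hqx : q x
        · rfl
        · exact absurd (h x hqx) hp
      rw [List.dropWhile_cons, if_neg hp, List.dropWhile_cons, hq, if_neg (by simp)]

/-- A's two pop-loops compute the reverse-dropWhile of `pvRem`. -/
theorem clean_end_eq (lines : List String) :
    clean_end lines = (lines.reverse.dropWhile pvRem).reverse := by
  have h1 := cleanEndLoop1_eq lines.reverse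
  rw [List.reverse_reverse] at h1
  have h2 := cleanEndLoop2_eq (lines.reverse.dropWhile pvRem)
  rw [clean_end, h1, h2,
    dropWhile_dropWhile pvRem (fun s => PySem.Str.strip s == "")
      (fun x hx => by
        simp only [pvRem, show (PySem.Str.strip x == "") = true from hx, Bool.true_or])
      lines.reverse]

/-- B's loop body condition is the negation of `pvRem`. -/
theorem cond_eq_not_pvRem (x : String) :
    ((PySem.Str.strip x != "")
        && !(PySem.Str.strip x == "(check-sat)" || PySem.Str.strip x == "(get-objectives)"
              || PySem.Str.strip x == "(exit)")
        && !PySem.Str.startswith (PySem.Str.strip x) "(set-option :timeout") = !pvRem x := by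
  simp only [pvRem, bne, Bool.not_or, Bool.and_assoc]

def pvKeep (lines : List String) : Int :=
  (PySem.List.enumerate lines).foldl
    (fun keep p =>
      let line := PySem.Str.strip p.2
      if (line != "")
          && !(line == "(check-sat)" || line == "(get-objectives)" || line == "(exit)")
          && !PySem.Str.startswith line "(set-option :timeout" then p.1 + 1 else keep)
    0

theorem pvKeep_concat (l : List String) (x : String) :
    pvKeep (l ++ [x]) = if pvRem x then pvKeep l else (l.length : Int) + 1 := by
  unfold pvKeep
  rw [PySem.List.enumerate_append, List.foldl_append, PySem.List.enumerate_cons,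
    PySem.List.enumerate_nil, List.foldl_cons, List.foldl_nil]
  simp only [cond_eq_not_pvRem]
  cases pvRem x
  · simp
  · simp

theorem pvKeep_bounds (l : List String) : 0 ≤ pvKeep l ∧ pvKeep l ≤ l.length := by
  induction l using List.reverseRecOn with
  | nil => simp [pvKeep, PySem.List.enumerate_nil]
  | append_singleton l x ih =>
    rw [pvKeep_concat]
    cases h : pvRem x <;> simp <;> omega

theorem take_keep_eq (l : List String) :
    l.take (pvKeep l).toNat = (l.reverse.dropWhile pvRem).reverse := by
  induction l using List.reverseRecOn with
  | nil => simp
  | append_singleton l x ih =>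
    rw [pvKeep_concat, List.reverse_append, List.reverse_singleton, List.singleton_append,
      List.dropWhile_cons]
    cases h : pvRem x
    · rw [if_neg (by simp), if_neg (by simp)]
      have : ((l.length : Int) + 1).toNat = l.length + 1 := by omega
      rw [this, List.take_of_length_le (by simp)]
      simp
    · rw [if_pos rfl, if_pos rfl]
      have hle : (pvKeep l).toNat ≤ l.length := by
        have := pvKeep_bounds l; omega
      rw [List.take_append_of_le_length hle, ih]

theorem clean_end_alt_eq (lines : List String) :
    clean_end_alt lines = (lines.reverse.dropWhile pvRem).reverse := by
  have h0 : 0 ≤ pvKeep lines := (pvKeep_bounds lines).1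
  show PySem.List.slice lines none (some (pvKeep lines)) = _
  rw [PySem.List.slice_to lines h0, take_keep_eq]

-- ===== VERDICT (by name: the statement is the Claim_ definition above) =====
theorem clean_end_spec : Claim_equal_clean_end := by
  intro lines _
  show clean_end lines = clean_end_alt lines
  rw [clean_end_eq, clean_end_alt_eq]
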